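-- pv_equiv track=rewrite | github.com/HDClark94/Edmond | Toy_grid_cell/Periodic_classifiation_fpr.py | ignore_end_trials_in_block
-- ===== SOURCE A (Python) =====
-- def ignore_end_trials_in_block(cell_true_classifications):
--     new_cell_true_classifications = cell_true_classifications.copy()
--     for i in range(len(cell_true_classifications)):
--         if (i == 0) or (i == len(cell_true_classifications)-1):
--             ignore = True
--         elif (cell_true_classifications[i] != cell_true_classifications[i-1]) or \
--                 (cell_true_classifications[i] != cell_true_classifications[i+1]):
--             ignore = True
--         else:
--             ignore = False
--
--         if ignore:
--             new_cell_true_classifications[i] = ""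
--     return new_cell_true_classifications
-- ===== SOURCE B (Python) =====
-- def ignore_end_trials_in_block(cell_true_classifications):
--     out = []
--     n = len(cell_true_classifications)
--     i = 0
--     while i < n:
--         v = cell_true_classifications[i]
--         j = i
--         while j + 1 < n and cell_true_classifications[j + 1] == v:
--             j += 1
--         # maximal run of v is [i, j]: blank both run ends, keep the interior
--         L = j - i + 1
--         if L == 1:
--             out.append("")
--         else:
--             out.append("")
--             out.extend([v] * (L - 2))
--             out.append("")
--         i = j + 1
--     return out
-- ===== Notes on version B (the rewrite author's own statement) =====
-- stated objective: alternative
-- what changed: B replaces A's per-index loop with i-1/i+1 neighbour comparisons and endpoint special cases by a single scan over maximal runs of equal values, emitting each run as blank-edge/kept-interior directly into a fresh output list.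
import Mathlib
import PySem

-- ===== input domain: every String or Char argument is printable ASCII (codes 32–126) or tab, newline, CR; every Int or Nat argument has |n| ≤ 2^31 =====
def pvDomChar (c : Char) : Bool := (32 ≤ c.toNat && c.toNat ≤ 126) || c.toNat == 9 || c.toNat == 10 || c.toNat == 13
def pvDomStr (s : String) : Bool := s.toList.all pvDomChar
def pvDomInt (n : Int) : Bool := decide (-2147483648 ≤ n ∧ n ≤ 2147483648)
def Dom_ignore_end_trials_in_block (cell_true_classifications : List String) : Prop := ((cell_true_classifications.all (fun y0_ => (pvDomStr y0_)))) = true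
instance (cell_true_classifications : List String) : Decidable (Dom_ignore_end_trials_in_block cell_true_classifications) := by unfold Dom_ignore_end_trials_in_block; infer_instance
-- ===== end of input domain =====

-- B replaces A's per-index neighbour-comparison loop by a single scan over maximal runs of
-- equal values, blanking each run's two ends and keeping its interior (objective: alternative).

-- ===== PORT A =====
-- literal port of A: copy the list, then for i in range(n) blank index i when it is an
-- endpoint or differs from a neighbour (the neighbour indices are always in range when read,
-- so getD with default "" is exact).
def ignore_end_trials_in_block (cell_true_classifications : List String) : List String :=
  (List.range cell_true_classifications.length).foldl
    (fun new i =>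
      let ignore : Bool :=
        if i = 0 ∨ i = cell_true_classifications.length - 1 then true
        else if cell_true_classifications.getD i "" ≠ cell_true_classifications.getD (i-1) "" ∨
                cell_true_classifications.getD i "" ≠ cell_true_classifications.getD (i+1) "" then true
        else false
      if ignore then new.set i "" else new)
    cell_true_classifications

-- ===== PORT B =====
-- B-side helper: the inner while loop of Source B — count of further leading elements equal to v,
-- plus the remainder of the list after the run.
def pvSplitRun (v : String) : List String → Nat × List String
  | [] => (0, [])
  | c :: rest =>
    if c = v then
      let p := pvSplitRun v rest
      (p.1 + 1, p.2)
    else (0, c :: rest)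

theorem pvSplitRun_length_le (v : String) (l : List String) : (pvSplitRun v l).2.length ≤ l.length := by
  induction l with
  | nil => simp [pvSplitRun]
  | cons c rest ih =>
    by_cases h : c = v <;> simp [pvSplitRun, h] <;> omega

-- literal port of B: the outer while loop of Source B, one recursive step per maximal run;
-- a run of length L = k+1 is emitted as "" , interior (L-2 copies of v) , "".
def ignore_end_trials_in_block_alt : List String → List String
  | [] => []
  | c :: rest =>
    let p := pvSplitRun c rest
    (if p.1 = 0 then [""] else "" :: List.replicate (p.1 - 1) c ++ [""]) ++
      ignore_end_trials_in_block_alt p.2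
termination_by l => l.length
decreasing_by
  simpa using Nat.lt_succ_of_le (pvSplitRun_length_le c rest)

-- ===== PRECONDITION & SPEC =====
def Spec_ignore_end_trials_in_block (cell_true_classifications : List String) (out : List String) : Prop := out = ignore_end_trials_in_block_alt cell_true_classifications
instance (cell_true_classifications : List String) (out : List String) : Decidable (Spec_ignore_end_trials_in_block cell_true_classifications out) := by unfold Spec_ignore_end_trials_in_block; infer_instance

-- ===== CLAIM (what is proved, stated in full; the proofs are below) =====
def Claim_equal_ignore_end_trials_in_block : Prop := ∀ (cell_true_classifications : List String), Dom_ignore_end_trials_in_block cell_true_classifications → Spec_ignore_end_trials_in_block cell_true_classifications (ignore_end_trials_in_block cell_true_classifications)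

-- ===== LEMMAS AND PROOFS =====

-- the blanking condition A computes for index i (exactly A's boolean)
def pvCond (xs : List String) (i : Nat) : Bool :=
  if i = 0 ∨ i = xs.length - 1 then true
  else if xs.getD i "" ≠ xs.getD (i-1) "" ∨ xs.getD i "" ≠ xs.getD (i+1) "" then true
  else false

-- the common specification both ports are reduced to: the result pointwise
def pvSpecFn (xs : List String) : List String :=
  (List.range xs.length).map (fun j => if pvCond xs j then "" else xs.getD j "")

theorem self_eq_map (xs : List String) : xs = (List.range xs.length).map (fun j => xs.getD j "") := by
  apply List.ext_getElem (by simp)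
  intro i h1 h2
  simp [List.getD_eq_getElem?_getD, List.getElem?_eq_getElem h1]

theorem foldA (xs : List String) (m : Nat) (hm : m ≤ xs.length) :
    (List.range m).foldl (fun new i => if pvCond xs i then new.set i "" else new) xs
      = (List.range xs.length).map (fun j => if j < m ∧ pvCond xs j = true then "" else xs.getD j "") := by
  induction m with
  | zero => simpa using self_eq_map xs
  | succ m ih =>
    rw [List.range_succ, List.foldl_append, ih (by omega), List.foldl_cons, List.foldl_nil]
    by_cases hc : pvCond xs m = true
    · simp only [hc, if_true]
      apply List.ext_getElem (by simp)
      intro i h1 h2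
      simp only [List.getElem_set, List.getElem_map, List.getElem_range]
      simp only [List.length_map, List.length_range] at h2
      by_cases him : m = i
      · subst him; simp [hc]
      · have : (i ≤ m ∧ pvCond xs i = true) ↔ (i < m ∧ pvCond xs i = true) := by
          constructor <;> rintro ⟨h, h'⟩ <;> exact ⟨by omega, h'⟩
        simp [him, this]
    · simp only [hc, if_false]
      apply List.map_congr_left
      intro j hj
      have : (j ≤ m ∧ pvCond xs j = true) ↔ (j < m ∧ pvCond xs j = true) := by
        constructor <;> rintro ⟨h, h'⟩
        · refine ⟨?_, h'⟩
          rcases Nat.lt_or_eq_of_le h with h | rfl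
          · exact h
          · exact absurd h' hc
        · exact ⟨by omega, h'⟩
      simp [this]

theorem getElem?_specFn (xs : List String) (i : Nat) :
    (pvSpecFn xs)[i]? = if i < xs.length then some (if pvCond xs i then "" else xs.getD i "") else none := by
  by_cases h : i < xs.length
  · simp [pvSpecFn, List.getElem?_map, List.getElem?_range, h]
  · rw [List.getElem?_eq_none (by simp [pvSpecFn]; omega), if_neg h]

theorem getD_run (c : String) (k : Nat) (r : List String) (i : Nat) :
    (c :: (List.replicate k c ++ r)).getD i "" = if i ≤ k then c else r.getD (i - (k+1)) "" := by
  simp only [List.getD_eq_getElem?_getD]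
  rcases i with _ | i
  · simp
  · simp only [List.getElem?_cons_succ]
    by_cases h : i < k
    · rw [List.getElem?_append_left (by simpa using h)]
      simp [List.getElem?_replicate, h]
    · rw [List.getElem?_append_right (by simpa using h)]
      have : ¬ (i + 1 ≤ k) := by omega
      simp [this]

theorem spec_decomp (c : String) (k : Nat) (r : List String)
    (hr : ∀ d, r.head? = some d → d ≠ c) :
    pvSpecFn (c :: (List.replicate k c ++ r))
      = (if k = 0 then [""] else "" :: List.replicate (k-1) c ++ [""]) ++ pvSpecFn r := by
  have hget := getD_run c k r
  have hlen : (c :: (List.replicate k c ++ r)).length = k + 1 + r.length := by simp; omega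
  have hrhs : ∀ i, ((if k = 0 then [""] else "" :: List.replicate (k-1) c ++ [""]) ++ pvSpecFn r)[i]?
      = if i = 0 then some "" else if i < k then some c else if i = k ∧ 1 ≤ k then some "" else (pvSpecFn r)[i - (k+1)]? := by
    intro i
    by_cases hk : k = 0
    · subst hk
      rcases i with _ | i
      · simp
      · simp [List.getElem?_cons_succ]
    · have hk1 : 1 ≤ k := by omega
      simp only [hk, if_false]
      rcases i with _ | i
      · simp
      · simp only [List.cons_append, List.append_assoc, List.getElem?_cons_succ]
        by_cases h1 : i < k - 1
        · rw [List.getElem?_append_left (by simpa using h1)]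
          simp [List.getElem?_replicate, h1]
          omega
        · rw [List.getElem?_append_right (by simpa using h1)]
          simp only [List.length_replicate]
          by_cases h2 : i = k - 1
          · rw [h2, Nat.sub_self, List.getElem?_cons_zero]
            rw [if_neg (show ¬ (k - 1 + 1 = 0) by omega), if_neg (show ¬ (k - 1 + 1 < k) by omega),
              if_pos (show k - 1 + 1 = k ∧ 1 ≤ k by omega)]
          · obtain ⟨j, hj⟩ : ∃ j, i - (k-1) = j + 1 := ⟨i - k, by omega⟩
            rw [hj, List.getElem?_cons_succ, List.nil_append]
            rw [if_neg (show ¬ (i + 1 = 0) by omega), if_neg (show ¬ (i + 1 < k) by omega),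
              if_neg (show ¬ (i + 1 = k ∧ 1 ≤ k) by omega)]
            congr 1
            omega
  apply List.ext_getElem?
  intro i
  rw [getElem?_specFn, hrhs]
  by_cases hin : i < (c :: (List.replicate k c ++ r)).length
  swap
  · rw [hlen] at hin
    rw [if_neg (by rw [hlen]; omega), if_neg (by omega), if_neg (by omega), if_neg (by omega)]
    rw [getElem?_specFn, if_neg (by omega)]
  · rw [if_pos hin]
    rw [hlen] at hin
    rcases (show i = 0 ∨ (1 ≤ i ∧ i < k) ∨ (i = k ∧ 1 ≤ k) ∨ (k + 1 ≤ i) from by omega) with h | ⟨h1, h2⟩ | ⟨h1, h2⟩ | h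
    · subst h
      rw [show pvCond (c :: (List.replicate k c ++ r)) 0 = true from by rw [pvCond]; simp,
        if_pos rfl]
      simp
    · have hne : ¬ (i = 0 ∨ i = (c :: (List.replicate k c ++ r)).length - 1) := by rw [hlen]; omega
      have hv := hget i
      have hvp := hget (i-1)
      have hvs := hget (i+1)
      rw [if_pos (by omega)] at hv hvp hvs
      have hc : pvCond (c :: (List.replicate k c ++ r)) i = false := by
        rw [pvCond, if_neg hne, hv, hvp, hvs]
        simp
      rw [hc, if_neg (by omega : ¬ i = 0), if_pos h2]
      simp only [Bool.false_eq_true, if_false]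
      rw [hv]
    · have hv := hget i
      rw [if_pos (by omega)] at hv
      have hc : pvCond (c :: (List.replicate k c ++ r)) i = true := by
        rcases r with _ | ⟨d, r'⟩
        · rw [pvCond, if_pos]
          right
          simp only [List.length_cons, List.length_append, List.length_replicate, List.length_nil]
          omega
        · have hd : d ≠ c := hr d rfl
          have hvs := hget (i+1)
          rw [if_neg (by omega), show i + 1 - (k+1) = 0 from by omega] at hvs
          simp only [List.getD_cons_zero] at hvs
          by_cases hlast : i = (c :: (List.replicate k c ++ (d :: r'))).length - 1
          · rw [pvCond, if_pos (Or.inr hlast)]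
          · rw [pvCond, if_neg (by push_neg; exact ⟨by omega, hlast⟩), if_pos]
            right; rw [hv, hvs]; exact Ne.symm hd
      rw [hc]
      simp [show ¬ i < k by omega, show i = k ∧ 1 ≤ k from ⟨h1, h2⟩, show ¬ i = 0 by omega]
    · rcases (show ∃ j, i = k + 1 + j from ⟨i - (k+1), by omega⟩) with ⟨j, rfl⟩
      have hjr : j < r.length := by omega
      rw [if_neg (show ¬ (k + 1 + j = 0) by omega), if_neg (show ¬ (k + 1 + j < k) by omega),
        if_neg (show ¬ (k + 1 + j = k ∧ 1 ≤ k) by omega),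
        show k + 1 + j - (k+1) = j from by omega, getElem?_specFn, if_pos hjr]
      have hv := hget (k+1+j)
      rw [if_neg (by omega), show k + 1 + j - (k+1) = j from by omega] at hv
      congr 1
      rcases Nat.eq_zero_or_pos j with rfl | hj1
      · rcases r with _ | ⟨d, r'⟩
        · simp at hjr
        · have hd : d ≠ c := hr d rfl
          have hcr : pvCond (d :: r') 0 = true := by simp [pvCond]
          have hvp := hget (k+1+0-1)
          rw [if_pos (by omega)] at hvp
          have hcx : pvCond (c :: (List.replicate k c ++ (d :: r'))) (k+1+0) = true := by
            by_cases hlast : k+1+0 = (c :: (List.replicate k c ++ (d :: r'))).length - 1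
            · rw [pvCond, if_pos (Or.inr hlast)]
            · rw [pvCond, if_neg (by push_neg; exact ⟨by omega, hlast⟩), if_pos]
              left; rw [hv, hvp]
              simp only [List.getD_cons_zero]
              exact hd
          rw [hcx, hcr]
          rfl
      · have hvp := hget (k+1+j-1)
        rw [if_neg (by omega), show k + 1 + j - 1 - (k+1) = j - 1 from by omega] at hvp
        have hvs := hget (k+1+j+1)
        rw [if_neg (by omega), show k + 1 + j + 1 - (k+1) = j + 1 from by omega] at hvs
        have hiff : (k + 1 + j = 0 ∨ k + 1 + j = (c :: (List.replicate k c ++ r)).length - 1) ↔ (j = 0 ∨ j = r.length - 1) := by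
          rw [hlen]; constructor <;> intro h <;> omega
        simp only [pvCond, hv, hvp, hvs, hiff]
        rfl

theorem pvSplitRun_eq (v : String) (l : List String) :
    List.replicate (pvSplitRun v l).1 v ++ (pvSplitRun v l).2 = l := by
  induction l with
  | nil => simp [pvSplitRun]
  | cons c rest ih =>
    by_cases h : c = v
    · subst h
      simp [pvSplitRun, List.replicate_succ, ih]
    · simp [pvSplitRun, h]

theorem pvSplitRun_head (v : String) (l : List String) :
    ∀ d, (pvSplitRun v l).2.head? = some d → d ≠ v := by
  induction l with
  | nil => simp [pvSplitRun]
  | cons c rest ih =>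
    by_cases h : c = v
    · simpa [pvSplitRun, h] using ih
    · intro d hd
      simp [pvSplitRun, h] at hd
      subst hd; exact h

theorem foldA_full (xs : List String) : ignore_end_trials_in_block xs = pvSpecFn xs := by
  have h0 : ignore_end_trials_in_block xs
      = (List.range xs.length).foldl (fun new i => if pvCond xs i then new.set i "" else new) xs := rfl
  rw [h0, foldA xs xs.length le_rfl]
  apply List.map_congr_left
  intro j hj
  simp only [List.mem_range] at hj
  simp [hj]

theorem B_eq_spec_aux : ∀ (n : Nat) (xs : List String), xs.length ≤ n →
    ignore_end_trials_in_block_alt xs = pvSpecFn xs := by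
  intro n
  induction n with
  | zero =>
    intro xs h
    have hx : xs = [] := by
      cases xs
      · rfl
      · simp at h
    subst hx
    simp [ignore_end_trials_in_block_alt, pvSpecFn]
  | succ n ih =>
    intro xs h
    rcases xs with _ | ⟨c, rest⟩
    · simp [ignore_end_trials_in_block_alt, pvSpecFn]
    · have hsplit := pvSplitRun_eq c rest
      have hhead := pvSplitRun_head c rest
      have hlen2 : (pvSplitRun c rest).2.length ≤ n := by
        have := pvSplitRun_length_le c rest
        simp at h
        omega
      calc ignore_end_trials_in_block_alt (c :: rest)
          = (if (pvSplitRun c rest).1 = 0 then [""]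
              else "" :: List.replicate ((pvSplitRun c rest).1 - 1) c ++ [""]) ++
              ignore_end_trials_in_block_alt (pvSplitRun c rest).2 := by
            rw [ignore_end_trials_in_block_alt]
        _ = (if (pvSplitRun c rest).1 = 0 then [""]
              else "" :: List.replicate ((pvSplitRun c rest).1 - 1) c ++ [""]) ++
              pvSpecFn (pvSplitRun c rest).2 := by rw [ih _ hlen2]
        _ = pvSpecFn (c :: (List.replicate (pvSplitRun c rest).1 c ++ (pvSplitRun c rest).2)) :=
            (spec_decomp c (pvSplitRun c rest).1 (pvSplitRun c rest).2 hhead).symm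
        _ = pvSpecFn (c :: rest) := by rw [hsplit]

theorem B_eq_spec (xs : List String) : ignore_end_trials_in_block_alt xs = pvSpecFn xs :=
  B_eq_spec_aux xs.length xs le_rfl

-- ===== VERDICT (by name: the statement is the Claim_ definition above) =====
theorem ignore_end_trials_in_block_spec : Claim_equal_ignore_end_trials_in_block := by
  intro xs _
  unfold Spec_ignore_end_trials_in_block
  rw [foldA_full, B_eq_spec]
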